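-- pv_equiv track=rewrite | github.com/riceowls256/Hist_Data_Ingestor | tests/hist_api/definition_research/contract_mapping_utils.py | get_contract_month_year
-- ===== SOURCE A (Python) =====
-- MONTH_CODES = {
--     'F': 1,  'G': 2,  'H': 3,  'J': 4,  'K': 5,  'M': 6,
--     'N': 7,  'Q': 8,  'U': 9,  'V': 10, 'X': 11, 'Z': 12
-- }
--
-- def get_contract_month_year(symbol):
--     """
--     Quick function to get month and year from contract symbol
--
--     Args:
--         symbol (str): Contract symbol like 'ESM5', 'CLZ4', etc.
--
--     Returns:
--         tuple: (month_number, full_year) or (None, None) if parsing fails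
--
--     Examples:
--         >>> get_contract_month_year('ESM5')
--         (6, 2025)
--         >>> get_contract_month_year('CLZ4')
--         (12, 2024)
--     """
--     if len(symbol) < 3:
--         return None, None
--
--     # Look for month code (letter) and year (number)
--     for i, char in enumerate(symbol):
--         if char in MONTH_CODES and i < len(symbol) - 1:
--             month_code = char
--             year_digits = symbol[i+1:]
--             if year_digits.isdigit():
--                 year_num = int(year_digits)
--                 # Convert 2-digit year to 4-digit
--                 full_year = 2000 + year_num if year_num < 50 else 1900 + year_num
--                 return MONTH_CODES[month_code], full_year
--
--     return None, None
-- ===== SOURCE B (Python) =====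
-- MONTH_CODES = {
--     'F': 1,  'G': 2,  'H': 3,  'J': 4,  'K': 5,  'M': 6,
--     'N': 7,  'Q': 8,  'U': 9,  'V': 10, 'X': 11, 'Z': 12
-- }
--
-- def get_contract_month_year(symbol):
--     """Parse right-to-left: find the trailing digit run, then look at the
--     single character just before it instead of scanning every position."""
--     if len(symbol) < 3:
--         return None, None
--     i = len(symbol)
--     while i > 0 and symbol[i - 1].isdigit():
--         i -= 1
--     if i == len(symbol) or i == 0:
--         return None, None
--     month = MONTH_CODES.get(symbol[i - 1])
--     if month is None:
--         return None, None
--     year_num = int(symbol[i:])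
--     full_year = 2000 + year_num if year_num < 50 else 1900 + year_num
--     return month, full_year
-- ===== Notes on version B (the rewrite author's own statement) =====
-- stated objective: faster
-- what changed: B walks one index from the end of the symbol to find the trailing digit run and checks only the single character before it, replacing A's left-to-right scan that re-slices and re-tests the whole suffix at every position.
import Mathlib
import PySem

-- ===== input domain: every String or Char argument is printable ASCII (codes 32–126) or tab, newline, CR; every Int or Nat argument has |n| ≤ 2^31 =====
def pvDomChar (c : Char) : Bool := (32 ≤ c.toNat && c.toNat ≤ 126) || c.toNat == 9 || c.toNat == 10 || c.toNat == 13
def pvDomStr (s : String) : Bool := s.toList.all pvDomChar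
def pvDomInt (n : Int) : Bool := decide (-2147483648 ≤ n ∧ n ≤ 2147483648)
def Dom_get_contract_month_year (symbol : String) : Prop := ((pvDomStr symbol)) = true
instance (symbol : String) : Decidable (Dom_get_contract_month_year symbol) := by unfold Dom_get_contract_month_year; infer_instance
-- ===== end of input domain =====

-- B parses right-to-left (finds the trailing digit run once) instead of A's scan of every
-- position with a fresh suffix check; objective: faster (one pass instead of a suffix re-check per position), same exact results.

-- ===== PORT A =====
-- the MONTH_CODES dict literal: lookup by key
def monthCode? (c : Char) : Option Int :=
  if c = 'F' then some 1 else if c = 'G' then some 2 else if c = 'H' then some 3 else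
  if c = 'J' then some 4 else if c = 'K' then some 5 else if c = 'M' then some 6 else
  if c = 'N' then some 7 else if c = 'Q' then some 8 else if c = 'U' then some 9 else
  if c = 'V' then some 10 else if c = 'X' then some 11 else if c = 'Z' then some 12 else none

-- A's 'for i, char in enumerate(symbol)' loop
def loopA (full : List Char) (i : Nat) (rest : List Char) : Option Int × Option Int :=
  match rest with
  | [] => (none, none)
  | c :: t =>
    if (monthCode? c).isSome && decide (i < full.length - 1) then
      -- year_digits = symbol[i+1:]
      let yd := PySem.List.slice full (some ((i : Int) + 1)) none
      if PySem.Chars.strIsdigit yd then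
        -- int(year_digits): guarded by isdigit, so it succeeds on the ASCII domain
        let yearNum := (PySem.Int.ofChars? yd).getD 0
        let fullYear := if yearNum < 50 then 2000 + yearNum else 1900 + yearNum
        (monthCode? c, some fullYear)
      else loopA full (i + 1) t
    else loopA full (i + 1) t

def get_contract_month_year (symbol : String) : Option Int × Option Int :=
  let cs := symbol.toList
  if cs.length < 3 then (none, none)
  else loopA cs 0 cs

-- ===== PORT B =====
-- B's 'while i > 0 and symbol[i-1].isdigit(): i -= 1' loop
def digitRunStart (cs : List Char) : Nat → Nat
  | 0 => 0
  | i + 1 => if PySem.Chars.isdigit (cs.getD i ' ') then digitRunStart cs i else i + 1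

def get_contract_month_year_alt (symbol : String) : Option Int × Option Int :=
  let cs := symbol.toList
  if cs.length < 3 then (none, none)
  else
    let i := digitRunStart cs cs.length
    if i = cs.length || i = 0 then (none, none)
    else
      match monthCode? (cs.getD (i - 1) ' ') with
      | none => (none, none)
      | some m =>
        -- int(symbol[i:]): guarded (all trailing chars are digits), succeeds on the ASCII domain
        let yearNum := (PySem.Int.ofChars? (cs.drop i)).getD 0
        let fullYear := if yearNum < 50 then 2000 + yearNum else 1900 + yearNum
        (some m, some fullYear)

-- ===== PRECONDITION & SPEC =====
def Spec_get_contract_month_year (symbol : String) (out : Option Int × Option Int) : Prop := out = get_contract_month_year_alt symbol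
instance (symbol : String) (out : Option Int × Option Int) : Decidable (Spec_get_contract_month_year symbol out) := by unfold Spec_get_contract_month_year; infer_instance

-- ===== CLAIM (what is proved, stated in full; the proofs are below) =====
def Claim_equal_get_contract_month_year : Prop := ∀ (symbol : String), Dom_get_contract_month_year symbol → Spec_get_contract_month_year symbol (get_contract_month_year symbol)

-- ===== LEMMAS AND PROOFS =====

-- month-code characters are letters, never digits
set_option maxHeartbeats 1000000 in
theorem monthCode?_of_digit (c : Char) (h : PySem.Chars.isdigit c = true) : monthCode? c = none := by
  simp only [PySem.Chars.isdigit, Bool.and_eq_true, decide_eq_true_eq] at h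
  unfold monthCode?
  split_ifs with h1 h2 h3 h4 h5 h6 h7 h8 h9 h10 h11 h12 <;> first
    | rfl
    | (subst_vars; exact absurd h (by decide))

theorem digitRunStart_le (cs : List Char) : ∀ m, digitRunStart cs m ≤ m := by
  intro m; induction m with
  | zero => simp [digitRunStart]
  | succ i ih => unfold digitRunStart; split <;> omega

theorem digitRunStart_digits (cs : List Char) :
    ∀ m j, digitRunStart cs m ≤ j → j < m → PySem.Chars.isdigit (cs.getD j ' ') = true := by
  intro m; induction m with
  | zero => omega
  | succ i ih =>
    intro j hj hjm
    unfold digitRunStart at hj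
    split at hj
    · rcases Nat.lt_succ_iff_lt_or_eq.mp hjm with h | h
      · exact ih j hj h
      · subst h; assumption
    · omega

theorem digitRunStart_min (cs : List Char) (k : Nat)
    (h : ∀ j, k ≤ j → j < cs.length → PySem.Chars.isdigit (cs.getD j ' ') = true) :
    ∀ m, m ≤ cs.length → digitRunStart cs m ≤ k := by
  intro m; induction m with
  | zero => intro _; simp [digitRunStart]
  | succ i ih =>
    intro him
    by_cases hik : i + 1 ≤ k
    · exact le_trans (digitRunStart_le cs (i+1)) hik
    · unfold digitRunStart
      rw [if_pos (h i (by omega) (by omega))]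
      exact ih (by omega)

-- all-digit characterisation of the suffix test
theorem strIsdigit_drop (cs : List Char) (m : Nat) :
    PySem.Chars.strIsdigit (cs.drop m) = true ↔
      m < cs.length ∧ ∀ j, m ≤ j → j < cs.length → PySem.Chars.isdigit (cs.getD j ' ') = true := by
  unfold PySem.Chars.strIsdigit
  rw [Bool.and_eq_true, List.all_eq_true]
  constructor
  · rintro ⟨h1, h2⟩
    have hlen : m < cs.length := by
      by_contra h
      simp [List.drop_eq_nil_of_le (by omega : cs.length ≤ m)] at h1
    refine ⟨hlen, fun j hmj hj => ?_⟩
    have : cs.getD j ' ' ∈ cs.drop m := by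
      rw [List.getD_eq_getElem cs ' ' hj]
      have : cs[j] = (cs.drop m)[j - m]'(by simp; omega) := by
        simp [List.getElem_drop]; congr 1; omega
      rw [this]; exact List.getElem_mem _
    exact h2 _ this
  · rintro ⟨hlen, h⟩
    constructor
    · simp [List.drop_eq_nil_iff]; omega
    · intro c hc
      rw [List.mem_iff_getElem] at hc
      obtain ⟨j, hj, rfl⟩ := hc
      have hjl : m + j < cs.length := by simp at hj; omega
      have : (cs.drop m)[j] = cs.getD (m + j) ' ' := by
        rw [List.getD_eq_getElem cs ' ' hjl]; simp [List.getElem_drop]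
      rw [this]; exact h _ (by omega) hjl

-- once inside the trailing digit run, A's loop finds no month code and returns (none, none)
theorem loopA_none (cs : List Char) :
    ∀ rest i, rest = cs.drop i → digitRunStart cs cs.length ≤ i →
      loopA cs i rest = (none, none) := by
  intro rest
  induction rest with
  | nil => intro i _ _; rfl
  | cons c t ih =>
    intro i hrest hki
    have hlen : i < cs.length := by
      by_contra h
      rw [List.drop_eq_nil_of_le (by omega)] at hrest; exact List.cons_ne_nil _ _ hrest
    rw [List.drop_eq_getElem_cons hlen] at hrest
    obtain ⟨hc, ht⟩ := (List.cons.injEq _ _ _ _).mp hrest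
    have hdig : PySem.Chars.isdigit c = true := by
      rw [hc, ← List.getD_eq_getElem cs ' ' hlen]
      exact digitRunStart_digits cs cs.length i hki hlen
    unfold loopA
    rw [monthCode?_of_digit c hdig]
    simp only [Option.isSome_none, Bool.false_and]
    exact ih (i + 1) ht (by omega)

-- the value both programs return at the hit position k-1 (k = start of the digit run)
theorem loopA_main (cs : List Char) (hn : ¬ cs.length < 3) :
    ∀ rest i, rest = cs.drop i → i < digitRunStart cs cs.length →
      loopA cs i rest =
        (if digitRunStart cs cs.length = cs.length ∨ digitRunStart cs cs.length = 0 then (none, none)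
         else
           match monthCode? (cs.getD (digitRunStart cs cs.length - 1) ' ') with
           | none => (none, none)
           | some m =>
             let yearNum := (PySem.Int.ofChars? (cs.drop (digitRunStart cs cs.length))).getD 0
             let fullYear := if yearNum < 50 then 2000 + yearNum else 1900 + yearNum
             (some m, some fullYear)) := by
  intro rest
  induction rest with
  | nil =>
    intro i hrest hik
    exfalso
    have h1 : cs.length ≤ i := List.drop_eq_nil_iff.mp hrest.symm
    have h2 := digitRunStart_le cs cs.length
    omega
  | cons c t ih =>
    intro i hrest hik
    set k := digitRunStart cs cs.length with hk
    have hkn : k ≤ cs.length := digitRunStart_le cs cs.length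
    have hlen : i < cs.length := by omega
    rw [List.drop_eq_getElem_cons hlen] at hrest
    obtain ⟨hc, ht⟩ := (List.cons.injEq _ _ _ _).mp hrest
    have hslice : PySem.List.slice cs (some ((i : Int) + 1)) none = cs.drop (i + 1) := by
      rw [PySem.List.slice_from cs (by positivity)]; norm_num
    unfold loopA
    by_cases hcond : ((monthCode? c).isSome && decide (i < cs.length - 1)) = true
    · rw [if_pos hcond]
      simp only [Bool.and_eq_true, decide_eq_true_eq] at hcond
      obtain ⟨hsome, hin⟩ := hcond
      simp only [hslice]
      by_cases hdigs : PySem.Chars.strIsdigit (cs.drop (i + 1)) = true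
      · rw [if_pos hdigs]
        obtain ⟨hi1n, hdigall⟩ := (strIsdigit_drop cs (i + 1)).mp hdigs
        have hk1 : k ≤ i + 1 := digitRunStart_min cs (i + 1) hdigall cs.length le_rfl
        have hkeq : k = i + 1 := by omega
        rw [if_neg (show ¬(k = cs.length ∨ k = 0) by omega)]
        have hgd : cs.getD (k - 1) ' ' = c := by
          rw [hkeq, Nat.add_sub_cancel, List.getD_eq_getElem cs ' ' hlen, hc]
        obtain ⟨m, hm⟩ := Option.isSome_iff_exists.mp hsome
        rw [hgd, hm, hkeq]
      · rw [if_neg hdigs]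
        by_cases hik1 : i + 1 < k
        · exact ih (i + 1) ht hik1
        · have hkeq : k = i + 1 := by omega
          by_cases hkl : k = cs.length
          · rw [if_pos (Or.inl hkl)]
            exact loopA_none cs t (i + 1) ht (by omega)
          · exfalso
            apply hdigs
            rw [← hkeq]
            exact (strIsdigit_drop cs k).mpr
              ⟨by omega, fun j hj hjl => digitRunStart_digits cs cs.length j hj hjl⟩
    · rw [if_neg hcond]
      by_cases hik1 : i + 1 < k
      · exact ih (i + 1) ht hik1
      · have hkeq : k = i + 1 := by omega
        have hnone : loopA cs (i + 1) t = (none, none) :=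
          loopA_none cs t (i + 1) ht (by omega)
        rw [hnone]
        by_cases hkl : k = cs.length
        · rw [if_pos (Or.inl hkl)]
        · rw [if_neg (show ¬(k = cs.length ∨ k = 0) by omega)]
          have hgd : cs.getD (k - 1) ' ' = c := by
            rw [hkeq, Nat.add_sub_cancel, List.getD_eq_getElem cs ' ' hlen, hc]
          have hmnone : monthCode? c = none := by
            simp only [Bool.and_eq_true, decide_eq_true_eq, not_and_or] at hcond
            rcases hcond with h | h
            · exact Option.not_isSome_iff_eq_none.mp h
            · omega
          rw [hgd, hmnone]

-- ===== VERDICT (by name: the statement is the Claim_ definition above) =====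
theorem get_contract_month_year_spec : Claim_equal_get_contract_month_year := by
  intro symbol _
  unfold Spec_get_contract_month_year get_contract_month_year get_contract_month_year_alt
  set cs := symbol.toList with hcs
  by_cases h3 : cs.length < 3
  · simp [h3]
  · simp only [if_neg h3]
    set k := digitRunStart cs cs.length with hk
    by_cases hk0 : k = 0
    · rw [loopA_none cs cs 0 (by simp) (by omega)]
      simp [hk0]
    · rw [loopA_main cs h3 cs 0 (by simp) (by omega)]
      simp only [← hk]
      by_cases hkl : k = cs.length
      · simp [hkl]
      · rw [if_neg (show ¬(k = cs.length ∨ k = 0) by omega),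
            if_neg (show ¬((decide (k = cs.length) || decide (k = 0)) = true) by simp [hkl, hk0])]
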